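-- pv_equiv track=rewrite | github.com/apache/ambari | ambari-common/src/main/python/resource_management/core/providers/package/__init__.py | get_package_details
-- ===== SOURCE A (Python) =====
-- def get_package_details(installed_packages, found_packages):
--   """
--   Gets the name, version, and repoName for the packages
--   :type installed_packages list[tuple[str,str,str]]
--   :type found_packages list[str]
--   """
--   package_details = []
--
--   for package in found_packages:
--     pkg_detail = {}
--     for installed_package in installed_packages:
--       if package == installed_package[0]:
--         pkg_detail['name'] = installed_package[0]
--         pkg_detail['version'] = installed_package[1]
--         pkg_detail['repoName'] = installed_package[2]
--
--     package_details.append(pkg_detail)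
--
--   return package_details
-- ===== SOURCE B (Python) =====
-- def get_package_details(installed_packages, found_packages):
--   """
--   Gets the name, version, and repoName for the packages
--   :type installed_packages list[tuple[str,str,str]]
--   :type found_packages list[str]
--   """
--   index = {}
--   for name, version, repo_name in installed_packages:
--     index[name] = (version, repo_name)
--
--   result = []
--   for package in found_packages:
--     if package in index:
--       version, repo_name = index[package]
--       result.append({'name': package, 'version': version, 'repoName': repo_name})
--     else:
--       result.append({})
--   return result
-- ===== Notes on version B (the rewrite author's own statement) =====
-- stated objective: faster
-- what changed: Builds a name->(version,repo) dict from installed_packages once (last occurrence wins) and then does one lookup per found package, instead of rescanning the whole installed list for every found package.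
import Mathlib
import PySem

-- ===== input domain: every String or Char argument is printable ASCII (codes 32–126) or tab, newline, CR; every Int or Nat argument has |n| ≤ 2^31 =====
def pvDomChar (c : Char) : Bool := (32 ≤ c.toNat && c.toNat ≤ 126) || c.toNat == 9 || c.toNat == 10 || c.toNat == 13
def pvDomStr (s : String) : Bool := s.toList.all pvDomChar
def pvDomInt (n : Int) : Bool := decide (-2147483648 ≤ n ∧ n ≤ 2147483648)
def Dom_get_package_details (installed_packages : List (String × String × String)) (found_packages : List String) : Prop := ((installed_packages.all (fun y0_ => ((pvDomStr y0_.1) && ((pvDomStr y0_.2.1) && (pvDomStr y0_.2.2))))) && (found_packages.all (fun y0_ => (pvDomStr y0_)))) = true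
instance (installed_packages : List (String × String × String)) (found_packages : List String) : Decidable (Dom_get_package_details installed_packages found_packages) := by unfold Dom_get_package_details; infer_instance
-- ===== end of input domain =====

-- B replaces A's rescan of installed_packages for every found package by one dict built once
-- from installed_packages and a single lookup per found package (objective: faster).

-- ===== PORT A =====
-- inner loop: for installed_package in installed_packages: if package == installed_package[0]: …
def pvInnerA (package : String) (installed_packages : List (String × String × String))
    (pkg_detail : PySem.Dict String String) : PySem.Dict String String :=
  installed_packages.foldl
    (fun pd ip =>
      if package == ip.1 then
        ((pd.insert "name" ip.1).insert "version" ip.2.1).insert "repoName" ip.2.2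
      else pd)
    pkg_detail

def get_package_details (installed_packages : List (String × String × String)) (found_packages : List String) : List (List (String × String)) :=
  found_packages.foldl
    (fun package_details package =>
      package_details ++ [(pvInnerA package installed_packages PySem.Dict.empty).items])
    []

-- ===== PORT B =====
def get_package_details_alt (installed_packages : List (String × String × String)) (found_packages : List String) : List (List (String × String)) :=
  let index : PySem.Dict String (String × String) :=
    installed_packages.foldl (fun d ip => d.insert ip.1 (ip.2.1, ip.2.2)) PySem.Dict.empty
  found_packages.foldl
    (fun result package =>
      match index.get? package with
      | some (version, repo_name) =>
          result ++ [[("name", package), ("version", version), ("repoName", repo_name)]]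
      | none => result ++ [[]])
    []

-- ===== PRECONDITION & SPEC =====
def Spec_get_package_details (installed_packages : List (String × String × String)) (found_packages : List String) (out : List (List (String × String))) : Prop := out = get_package_details_alt installed_packages found_packages
instance (installed_packages : List (String × String × String)) (found_packages : List String) (out : List (List (String × String))) : Decidable (Spec_get_package_details installed_packages found_packages out) := by unfold Spec_get_package_details; infer_instance

-- ===== CLAIM (what is proved, stated in full; the proofs are below) =====
def Claim_equal_get_package_details : Prop := ∀ (installed_packages : List (String × String × String)) (found_packages : List String), Dom_get_package_details installed_packages found_packages → Spec_get_package_details installed_packages found_packages (get_package_details installed_packages found_packages)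

-- ===== LEMMAS AND PROOFS =====

-- the only shapes A's inner accumulator takes: {} before a match, the 3-key dict after
def pvShape (package : String) : Option (String × String) → PySem.Dict String String
  | none => PySem.Dict.empty
  | some (v, r) => PySem.Dict.ofList [("name", package), ("version", v), ("repoName", r)]

theorem pvShape_step (package v r : String) (o : Option (String × String)) :
    (((pvShape package o).insert "name" package).insert "version" v).insert "repoName" r
      = pvShape package (some (v, r)) := by
  rcases o with _ | ⟨v0, r0⟩ <;> rfl

theorem pvInnerA_eq_shape (package : String) (l : List (String × String × String)) :
    ∀ (m : PySem.Dict String (String × String)),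
      pvInnerA package l (pvShape package (m.get? package))
        = pvShape package ((l.foldl (fun d ip => d.insert ip.1 (ip.2.1, ip.2.2)) m).get? package) := by
  induction l with
  | nil => intro m; rfl
  | cons ip rest ih =>
    intro m
    simp only [pvInnerA, List.foldl_cons] at *
    by_cases h : package = ip.1
    · subst h
      rw [if_pos (by simp), pvShape_step,
        ← PySem.Dict.get?_insert_self m ip.1 (ip.2.1, ip.2.2)]
      exact ih (m.insert ip.1 (ip.2.1, ip.2.2))
    · rw [if_neg (by simpa using h)]
      have hg : (m.insert ip.1 (ip.2.1, ip.2.2)).get? package = m.get? package :=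
        PySem.Dict.get?_insert_of_ne m (ip.2.1, ip.2.2) h
      rw [show pvShape package (m.get? package)
            = pvShape package ((m.insert ip.1 (ip.2.1, ip.2.2)).get? package) from by rw [hg]]
      exact ih (m.insert ip.1 (ip.2.1, ip.2.2))

theorem pvFoldl_concat {α β : Type} (f : α → β) (l : List α) :
    ∀ (acc : List β), l.foldl (fun a x => a ++ [f x]) acc = acc ++ l.map f := by
  induction l with
  | nil => intro acc; simp
  | cons x rest ih => intro acc; simp [ih]

-- ===== VERDICT (by name: the statement is the Claim_ definition above) =====
theorem get_package_details_spec : Claim_equal_get_package_details := by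
  intro installed found _
  unfold Spec_get_package_details get_package_details get_package_details_alt
  show found.foldl (fun package_details package =>
        package_details ++ [(pvInnerA package installed PySem.Dict.empty).items]) []
      = found.foldl (fun result package =>
          match (installed.foldl (fun d ip => d.insert ip.1 (ip.2.1, ip.2.2)) PySem.Dict.empty).get? package with
          | some (version, repo_name) =>
              result ++ [[("name", package), ("version", version), ("repoName", repo_name)]]
          | none => result ++ [[]]) []
  have key : ∀ package : String,
      (pvInnerA package installed PySem.Dict.empty).items
        = (pvShape package ((installed.foldl (fun d ip => d.insert ip.1 (ip.2.1, ip.2.2)) PySem.Dict.empty).get? package)).items := by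
    intro package
    have h := pvInnerA_eq_shape package installed PySem.Dict.empty
    rw [PySem.Dict.get?_empty] at h
    exact congrArg PySem.Dict.items h
  have hcong : found.foldl (fun result package =>
          match (installed.foldl (fun d ip => d.insert ip.1 (ip.2.1, ip.2.2)) PySem.Dict.empty).get? package with
          | some (version, repo_name) =>
              result ++ [[("name", package), ("version", version), ("repoName", repo_name)]]
          | none => result ++ [[]]) []
      = found.foldl (fun a package =>
          a ++ [(pvShape package ((installed.foldl (fun d ip => d.insert ip.1 (ip.2.1, ip.2.2)) PySem.Dict.empty).get? package)).items]) [] := by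
    apply PySem.List.foldl_congr_mem
    intro acc package _
    rcases hg : (installed.foldl (fun d ip => d.insert ip.1 (ip.2.1, ip.2.2)) PySem.Dict.empty).get? package with _ | ⟨v, r⟩ <;>
      simp [hg, pvShape] <;> rfl
  rw [hcong, pvFoldl_concat, pvFoldl_concat]
  simpa using List.map_congr_left (fun package _ => key package)
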